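-- pv_equiv track=rewrite | github.com/ShreyPatel4/solution_SnowConvertAI_final | snowconvert/make_loadable.py | _count_unquoted_dots
-- ===== SOURCE A (Python) =====
-- def _count_unquoted_dots(s: str) -> int:
--     """Count dots in s that are outside of "..." quotes."""
--     count = 0
--     in_quote = False
--     i = 0
--     while i < len(s):
--         c = s[i]
--         if c == '"':
--             in_quote = not in_quote
--         elif c == "." and not in_quote:
--             count += 1
--         i += 1
--     return count
-- ===== SOURCE B (Python) =====
-- def _count_unquoted_dots(s: str) -> int:
--     """Count dots in s that are outside of "..." quotes."""
--     return sum(seg.count(".") for i, seg in enumerate(s.split('"')) if i % 2 == 0)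
-- ===== Notes on version B (the rewrite author's own statement) =====
-- stated objective: faster
-- what changed: Replaces the stateful character-by-character in_quote toggle loop with a partition: split on the double-quote character and sum the dot counts of the even-indexed (outside-quote) segments.
import Mathlib
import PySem

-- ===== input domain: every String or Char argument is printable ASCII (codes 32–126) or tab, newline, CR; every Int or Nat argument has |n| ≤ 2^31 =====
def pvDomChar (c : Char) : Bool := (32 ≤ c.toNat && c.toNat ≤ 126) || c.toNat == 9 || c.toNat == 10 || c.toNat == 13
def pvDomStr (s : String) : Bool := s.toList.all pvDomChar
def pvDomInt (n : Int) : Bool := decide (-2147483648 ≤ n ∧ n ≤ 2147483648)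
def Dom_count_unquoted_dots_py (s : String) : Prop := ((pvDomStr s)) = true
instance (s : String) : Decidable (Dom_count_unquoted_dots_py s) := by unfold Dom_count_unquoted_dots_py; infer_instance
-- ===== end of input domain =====

-- B replaces A's stateful in_quote character loop by splitting on '"' and summing the
-- dot counts of the even-indexed segments (idiomatic; same O(n) cost).

-- ===== PORT A =====
-- the while loop over s[i] with the (count, in_quote) state, as structural recursion over the characters
def pvALoop : List Char → Int → Bool → Int
  | [], count, _ => count
  | c :: rest, count, in_quote =>
    if c == '"' then pvALoop rest count (!in_quote)
    else if c == '.' && !in_quote then pvALoop rest (count + 1) in_quote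
    else pvALoop rest count in_quote

def count_unquoted_dots_py (s : String) : Int := pvALoop s.toList 0 false

-- ===== PORT B =====
-- s.split('"') → List.splitOn '"' (exact for a one-character separator);
-- seg.count('.') → List.count '.' (exact for a one-character needle);
-- sum over enumerate with the even-index filter → foldl over PySem.List.enumerate
def count_unquoted_dots_py_alt (s : String) : Int :=
  (PySem.List.enumerate (s.toList.splitOn '"') 0).foldl
    (fun acc p => if p.1 % 2 == 0 then acc + (p.2.count '.' : Int) else acc) 0

-- ===== PRECONDITION & SPEC =====
def Spec_count_unquoted_dots_py (s : String) (out : Int) : Prop := out = count_unquoted_dots_py_alt s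
instance (s : String) (out : Int) : Decidable (Spec_count_unquoted_dots_py s out) := by unfold Spec_count_unquoted_dots_py; infer_instance

-- ===== CLAIM =====
def Claim_equal_count_unquoted_dots_py : Prop := ∀ (s : String), Dom_count_unquoted_dots_py s → Spec_count_unquoted_dots_py s (count_unquoted_dots_py s)

-- ===== LEMMAS AND PROOFS =====

-- dots of the segments at even "outside" positions, as a toggle over the segment list
def pvSegCount : List (List Char) → Bool → Int
  | [], _ => 0
  | seg :: rest, inq => (if inq then 0 else (seg.count '.' : Int)) + pvSegCount rest (!inq)

theorem pvALoop_eq_segCount (l : List Char) :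
    ∀ (count : Int) (inq : Bool), pvALoop l count inq = count + pvSegCount (l.splitOn '"') inq := by
  induction l with
  | nil => intro count inq; simp [pvALoop, List.splitOn_nil, pvSegCount]
  | cons c rest ih =>
    intro count inq
    by_cases hc : c = '"'
    · subst hc
      simp only [List.splitOn, List.splitOnP_cons, beq_self_eq_true, if_true, pvALoop, pvSegCount, ih]
      simp
    · have hsplit : rest.splitOn '"' ≠ [] := List.splitOnP_ne_nil _ _
      obtain ⟨h, t, ht⟩ := List.exists_cons_of_ne_nil hsplit
      have hb : (c == '"') = false := by simp [hc]
      rw [List.splitOn, List.splitOnP_cons]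
      rw [show (c == '"') = false from hb]
      simp only [if_false, Bool.false_eq_true]
      rw [show rest.splitOnP (· == '"') = h :: t from ht]
      simp only [List.modifyHead]
      by_cases hd : c = '.'
      · subst hd
        cases inq with
        | false =>
          simp only [pvALoop, hb, Bool.not_false, beq_self_eq_true, Bool.and_self, if_true,
            Bool.false_eq_true, if_false, ih, ht, pvSegCount, List.count_cons]
          push_cast
          ring
        | true =>
          simp only [pvALoop, hb, Bool.not_true, Bool.and_false, Bool.false_eq_true, if_false,
            ih, ht, pvSegCount]
          simp
      · have hdb : (c == '.') = false := by simp [hd]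
        simp only [pvALoop, hb, Bool.false_eq_true, if_false, Bool.false_and, ih, ht,
          pvSegCount, List.count_cons, hdb]
        cases inq <;> simp <;> ring

theorem pvFold_eq_segCount (segs : List (List Char)) :
    ∀ (n : Nat) (acc : Int),
      (PySem.List.enumerate segs (n : Int)).foldl
        (fun acc p => if p.1 % 2 == 0 then acc + (p.2.count '.' : Int) else acc) acc
      = acc + pvSegCount segs (decide (n % 2 = 1)) := by
  induction segs with
  | nil => intro n acc; simp [PySem.List.enumerate_nil, pvSegCount]
  | cons seg rest ih =>
    intro n acc
    rw [PySem.List.enumerate_cons]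
    have hcast : ((n : Int) + 1) = ((n + 1 : Nat) : Int) := by push_cast; ring
    simp only [List.foldl_cons, hcast, ih]
    by_cases h : n % 2 = 0
    · have h0 : ((n : Int) % 2 == 0) = true := by
        rw [beq_iff_eq]; omega
      have h1 : (n + 1) % 2 = 1 := by omega
      simp only [h0, if_true, pvSegCount, h1]
      have : ¬ n % 2 = 1 := by omega
      simp [this]
      ring
    · have h0 : ((n : Int) % 2 == 0) = false := by
        rw [beq_eq_false_iff_ne]; omega
      have h1 : ¬ (n + 1) % 2 = 1 := by omega
      have h2 : n % 2 = 1 := by omega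
      simp only [h0, Bool.false_eq_true, if_false, pvSegCount, h2]
      simp [h1]

-- ===== VERDICT =====
theorem count_unquoted_dots_py_spec : Claim_equal_count_unquoted_dots_py := by
  intro s _
  unfold Spec_count_unquoted_dots_py count_unquoted_dots_py count_unquoted_dots_py_alt
  rw [pvALoop_eq_segCount]
  have hf := pvFold_eq_segCount (s.toList.splitOn '\"') 0 0
  push_cast at hf
  rw [hf]
  simp
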